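-- pv_equiv track=rewrite | github.com/DiamondLightSource/Opt-ID | IDSort/src/id_setup.py | create_type_list_apple_symmetric
-- ===== SOURCE A (Python) =====
-- def create_type_list_apple_symmetric(nperiods):
--     # do the first end
--     types = []
--     vertical = True
--
--     types.append('HE')
--     types.append('VE')
--     types.append('HE')
--
--     # now put in all the middle periods
--     for i in range(3, (4 * nperiods - 1) - 3, 1):
--         if vertical :
--             types.append('VV')
--             vertical = False
--         else :
--             types.append('HH')
--             vertical = True
--
--     # finally add in the other end
--     types.append('HE')
--     types.append('VE')
--     types.append('HE')
--
--     return types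
-- ===== SOURCE B (Python) =====
-- def create_type_list_apple_symmetric(nperiods):
--     end = ['HE', 'VE', 'HE']
--     mid = max(0, 4 * nperiods - 7)
--     middle = (['VV', 'HH'] * ((mid + 1) // 2))[:mid]
--     return end + middle + end
-- ===== Notes on version B (the rewrite author's own statement) =====
-- stated objective: simpler
-- what changed: Replaces the toggle-flag append loop with a closed-form middle length and builds the alternating middle by pair repetition plus a slice.
import Mathlib
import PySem

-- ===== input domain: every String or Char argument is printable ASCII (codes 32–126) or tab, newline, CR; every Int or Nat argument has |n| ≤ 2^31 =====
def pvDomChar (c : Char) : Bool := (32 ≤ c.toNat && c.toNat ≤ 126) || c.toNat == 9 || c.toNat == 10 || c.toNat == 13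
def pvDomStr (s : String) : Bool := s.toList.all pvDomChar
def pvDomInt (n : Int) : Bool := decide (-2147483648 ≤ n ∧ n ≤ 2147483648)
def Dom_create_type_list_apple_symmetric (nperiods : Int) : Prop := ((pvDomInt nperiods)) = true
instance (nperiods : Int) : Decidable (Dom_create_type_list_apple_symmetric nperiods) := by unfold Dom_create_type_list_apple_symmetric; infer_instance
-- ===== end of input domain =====

-- B replaces A's toggle-flag loop by a closed-form middle length and pair repetition + slice (objective: simpler).

-- ===== PORT A =====
-- the loop over range(3, (4*nperiods-1)-3, 1) with state (types, vertical)
def create_type_list_apple_symmetric (nperiods : Int) : List String :=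
  let st :=
    (PySem.List.pyRange 3 ((4 * nperiods - 1) - 3) 1).foldl
      (fun (st : List String × Bool) _ =>
        if st.2 then (st.1 ++ ["VV"], false) else (st.1 ++ ["HH"], true))
      (["HE", "VE", "HE"], true)
  st.1 ++ ["HE", "VE", "HE"]

-- ===== PORT B =====
-- ['VV','HH'] * k  →  (List.replicate k ["VV","HH"]).flatten;  [:mid] with 0 ≤ mid  →  List.take mid.toNat (exact here)
def create_type_list_apple_symmetric_alt (nperiods : Int) : List String :=
  let ends := ["HE", "VE", "HE"]
  let mid : Int := max 0 (4 * nperiods - 7)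
  let middle :=
    (List.replicate (PySem.Int.floordiv (mid + 1) 2).toNat ["VV", "HH"]).flatten.take mid.toNat
  ends ++ middle ++ ends

-- ===== PRECONDITION & SPEC =====
def Spec_create_type_list_apple_symmetric (nperiods : Int) (out : List String) : Prop := out = create_type_list_apple_symmetric_alt nperiods
instance (nperiods : Int) (out : List String) : Decidable (Spec_create_type_list_apple_symmetric nperiods out) := by unfold Spec_create_type_list_apple_symmetric; infer_instance

-- ===== CLAIM (what is proved, stated in full; the proofs are below) =====
def Claim_equal_create_type_list_apple_symmetric : Prop := ∀ (nperiods : Int), Dom_create_type_list_apple_symmetric nperiods → Spec_create_type_list_apple_symmetric nperiods (create_type_list_apple_symmetric nperiods)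

-- ===== LEMMAS AND PROOFS =====

/-- The alternating string sequence of length `n` starting with `"VV"` iff `b`. -/
def altStrs : Nat → Bool → List String
  | 0, _ => []
  | n + 1, true => "VV" :: altStrs n false
  | n + 1, false => "HH" :: altStrs n true

theorem foldl_toggle (l : List Int) :
    ∀ (acc : List String) (b : Bool),
      (l.foldl
        (fun (st : List String × Bool) _ =>
          if st.2 then (st.1 ++ ["VV"], false) else (st.1 ++ ["HH"], true))
        (acc, b)).1 = acc ++ altStrs l.length b := by
  induction l with
  | nil => intro acc b; simp [altStrs]
  | cons x l ih =>
    intro acc b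
    cases b <;> simp [List.foldl_cons, altStrs, ih]

theorem take_pair_flatten (k : Nat) :
    ((List.replicate ((k + 1) / 2) ["VV", "HH"]).flatten.take k : List String)
      = altStrs k true := by
  induction k using Nat.twoStepInduction with
  | zero => simp [altStrs]
  | one => simp [altStrs, List.replicate]
  | more k ih _ =>
    have h2 : (k + 2 + 1) / 2 = (k + 1) / 2 + 1 := by omega
    rw [h2, List.replicate_succ]
    simp only [List.flatten_cons, List.cons_append, List.nil_append, List.take_succ_cons]
    rw [ih]
    rfl

-- ===== VERDICT (by name: the statement is the Claim_ definition above) =====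
theorem create_type_list_apple_symmetric_spec : Claim_equal_create_type_list_apple_symmetric := by
  intro n _
  unfold Spec_create_type_list_apple_symmetric
  unfold create_type_list_apple_symmetric create_type_list_apple_symmetric_alt
  simp only []
  rw [foldl_toggle, PySem.List.length_pyRange_one]
  rw [PySem.Int.floordiv_eq_ediv_of_pos (by omega)]
  have hlen : ((4 * n - 1) - 3 - 3).toNat = (max 0 (4 * n - 7)).toNat := by omega
  have hdiv : ((max 0 (4 * n - 7) + 1) / 2).toNat = ((max 0 (4 * n - 7)).toNat + 1) / 2 := by omega
  rw [hlen, hdiv, take_pair_flatten]
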